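-- pv_equiv track=rewrite | github.com/DaftFunked/AyED | AyED/Tarea0/B. Alicia y el cachorro saltarín.py | contar_caidas_cachorro
-- ===== SOURCE A (Python) =====
-- def contar_caidas_cachorro(saltos_cachorro, posicion_alicia):
--     caidas = 0
--     posicion_cachorro = 0
--
--     for salto in saltos_cachorro:
--         posicion_cachorro += salto
--         if posicion_cachorro == posicion_alicia:
--             caidas += 1
--
--     return caidas
-- ===== SOURCE B (Python) =====
-- def contar_caidas_cachorro(saltos_cachorro, posicion_alicia):
--     xs = saltos_cachorro
--
--     def go(lo, hi, objetivo):
--         # For the segment xs[lo:hi] (nonempty), return a pair: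
--         # (number of nonempty prefixes of the segment whose sum equals objetivo,
--         #  total sum of the segment).
--         if hi - lo == 1:
--             x = xs[lo]
--             return ((1 if x == objetivo else 0), x)
--         mid = (lo + hi) // 2
--         c1, s1 = go(lo, mid, objetivo)
--         c2, s2 = go(mid, hi, objetivo - s1)
--         return (c1 + c2, s1 + s2)
--
--     if not xs:
--         return 0
--     return go(0, len(xs), posicion_alicia)[0]
-- ===== Notes on version B (the rewrite author's own statement) =====
-- stated objective: alternative
-- what changed: Replaces A's left-to-right running-position loop by a divide-and-conquer recursion: split the jump list in half, count matches in the left half, recurse on the right half with the target shifted by the left half's sum; each call returns (count, segment sum).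
import Mathlib
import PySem

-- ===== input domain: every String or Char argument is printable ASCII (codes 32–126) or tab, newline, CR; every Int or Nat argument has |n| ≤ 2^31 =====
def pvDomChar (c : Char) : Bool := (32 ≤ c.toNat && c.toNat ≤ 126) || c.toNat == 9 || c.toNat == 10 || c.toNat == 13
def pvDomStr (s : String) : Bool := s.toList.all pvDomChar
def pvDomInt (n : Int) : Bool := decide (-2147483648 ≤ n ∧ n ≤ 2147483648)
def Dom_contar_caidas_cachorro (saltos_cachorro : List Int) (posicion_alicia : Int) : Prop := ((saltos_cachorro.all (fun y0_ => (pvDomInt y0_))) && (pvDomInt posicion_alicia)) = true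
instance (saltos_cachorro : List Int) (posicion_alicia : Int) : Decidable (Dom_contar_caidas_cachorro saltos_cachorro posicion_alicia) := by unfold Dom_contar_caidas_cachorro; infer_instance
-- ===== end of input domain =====

-- B replaces A's running-position loop by a divide-and-conquer recursion (split, count left, recurse right with shifted target); objective: alternative, same cost.

-- ===== PORT A =====
-- A's single loop carrying (caidas, posicion_cachorro)
def contar_caidas_cachorro (saltos_cachorro : List Int) (posicion_alicia : Int) : Int :=
  let st := saltos_cachorro.foldl
    (fun (s : Int × Int) (salto : Int) =>
      let posicion_cachorro := s.2 + salto
      (if posicion_cachorro = posicion_alicia then s.1 + 1 else s.1, posicion_cachorro))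
    (0, 0)
  st.1

-- ===== PORT B =====
-- B's helper go: on a nonempty segment, returns (count of nonempty prefixes summing to objetivo, segment sum);
-- the segment xs[lo:hi] of Source B is represented by the sublist itself (take/drop at mid).
def pvGo (xs : List Int) (objetivo : Int) : Int × Int :=
  match xs with
  | [] => (0, 0)  -- unreachable: Source B's go is only called on nonempty segments
  | [x] => ((if x = objetivo then 1 else 0), x)
  | x :: y :: t =>
    let mid := (x :: y :: t).length / 2
    let r1 := pvGo ((x :: y :: t).take mid) objetivo
    let r2 := pvGo ((x :: y :: t).drop mid) (objetivo - r1.2)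
    (r1.1 + r2.1, r1.2 + r2.2)
termination_by xs.length
decreasing_by
  · simp [List.length_take]; omega
  · simp [List.length_drop]; omega

def contar_caidas_cachorro_alt (saltos_cachorro : List Int) (posicion_alicia : Int) : Int :=
  match saltos_cachorro with
  | [] => 0
  | _ => (pvGo saltos_cachorro posicion_alicia).1

-- ===== PRECONDITION & SPEC =====
def Spec_contar_caidas_cachorro (saltos_cachorro : List Int) (posicion_alicia : Int) (out : Int) : Prop := out = contar_caidas_cachorro_alt saltos_cachorro posicion_alicia
instance (saltos_cachorro : List Int) (posicion_alicia : Int) (out : Int) : Decidable (Spec_contar_caidas_cachorro saltos_cachorro posicion_alicia out) := by unfold Spec_contar_caidas_cachorro; infer_instance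

-- ===== CLAIM (what is proved, stated in full; the proofs are below) =====
def Claim_equal_contar_caidas_cachorro : Prop := ∀ (saltos_cachorro : List Int) (posicion_alicia : Int), Dom_contar_caidas_cachorro saltos_cachorro posicion_alicia → Spec_contar_caidas_cachorro saltos_cachorro posicion_alicia (contar_caidas_cachorro saltos_cachorro posicion_alicia)

-- ===== LEMMAS AND PROOFS =====
-- Reference function: cnt xs pos p = number of nonempty prefixes of xs whose sum, added to pos, equals p.
def pvCnt (xs : List Int) (pos p : Int) : Int :=
  match xs with
  | [] => 0
  | x :: t => (if pos + x = p then 1 else 0) + pvCnt t (pos + x) p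

-- A's loop invariant: the fold from state (c, pos) returns c + pvCnt xs pos p.
theorem pvLoop_eq (p : Int) : ∀ (xs : List Int) (c pos : Int),
    (xs.foldl
      (fun (s : Int × Int) (salto : Int) =>
        let pc := s.2 + salto
        (if pc = p then s.1 + 1 else s.1, pc))
      (c, pos)).1
    = c + pvCnt xs pos p := by
  intro xs
  induction xs with
  | nil => intro c pos; simp [pvCnt]
  | cons x t ih =>
    intro c pos
    simp only [List.foldl_cons, pvCnt]
    rw [ih]
    by_cases h : pos + x = p
    · simp [h]; ring
    · simp [h]

-- shifting the start position is the same as shifting the target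
theorem pvCnt_shift : ∀ (xs : List Int) (pos p : Int), pvCnt xs pos p = pvCnt xs 0 (p - pos) := by
  intro xs
  induction xs with
  | nil => intro pos p; simp [pvCnt]
  | cons x t ih =>
    intro pos p
    simp only [pvCnt]
    rw [ih (pos + x) p, ih (0 + x) (p - pos)]
    have hc : (pos + x = p) = (0 + x = p - pos) := by
      apply propext; constructor <;> intro h <;> omega
    have ht : p - (pos + x) = p - pos - (0 + x) := by ring
    rw [ht]
    simp only [hc]

-- splitting: prefixes of l ++ r are prefixes of l, plus prefixes of r offset by sum l
theorem pvCnt_append : ∀ (l r : List Int) (pos p : Int),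
    pvCnt (l ++ r) pos p = pvCnt l pos p + pvCnt r (pos + l.sum) p := by
  intro l
  induction l with
  | nil => intro r pos p; simp [pvCnt]
  | cons x t ih =>
    intro r pos p
    simp only [List.cons_append, pvCnt, List.sum_cons]
    rw [ih]
    have : pos + (x + t.sum) = pos + x + t.sum := by ring
    rw [this]
    ring

-- correctness of B's divide and conquer
theorem pvGo_spec (xs : List Int) (t : Int) : pvGo xs t = (pvCnt xs 0 t, xs.sum) := by
  induction xs, t using pvGo.induct with
  | case1 t => simp [pvGo, pvCnt]
  | case2 t x => simp [pvGo, pvCnt]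
  | case3 t a b l mid r1 ihm ih1 ih2 =>
    have hsplit := List.take_append_drop ((a :: b :: l).length / 2) (a :: b :: l)
    simp only [pvGo]
    simp only [mid, r1, ih1] at ih2
    rw [ih1, ih2]
    refine Prod.ext ?_ ?_
    · show _ = pvCnt (a :: b :: l) 0 t
      conv_rhs => rw [← hsplit]
      rw [pvCnt_append, pvCnt_shift]
      simp
      conv_rhs => rw [pvCnt_shift]
    · show _ = (a :: b :: l).sum
      conv_rhs => rw [← hsplit]
      rw [List.sum_append]

-- ===== VERDICT (by name: the statement is the Claim_ definition above) =====
theorem contar_caidas_cachorro_spec : Claim_equal_contar_caidas_cachorro := by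
  intro xs p _
  unfold Spec_contar_caidas_cachorro contar_caidas_cachorro contar_caidas_cachorro_alt
  match xs with
  | [] => simp
  | y :: t =>
    rw [pvGo_spec]
    simpa using pvLoop_eq p (y :: t) 0 0
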